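-- pv_equiv track=rewrite | github.com/Baby-Feng/enCnFenci | test.py | judgeStr
-- ===== SOURCE A (Python) =====
-- def judgeStr(sequencyStr,windowSize):
-- 	status = -1
-- 	for i in sequencyStr:
-- 		if i == '1':
-- 			if status < windowSize:
-- 				#说明在范围内
-- 				status = 0
-- 			else:
-- 				#相邻两个1中间0的个数超过上限，被认为发散
-- 				return False
-- 		else:
-- 			#遇到0
-- 			if status > -1:
-- 				#说明遇到1
-- 				status += 1
-- 	return True
-- ===== SOURCE B (Python) =====
-- def judgeStr(sequencyStr, windowSize):
--     parts = sequencyStr.split('1')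
--     return all(len(p) < windowSize for p in parts[1:-1])
-- ===== Notes on version B (the rewrite author's own statement) =====
-- stated objective: idiomatic
-- what changed: Replaces the stateful character-by-character scan with a -1 sentinel counter by one split('1') and an all() over the lengths of the zero-runs strictly between consecutive ones (split runs at C speed, removing the per-character interpreted loop).
-- intended difference: On strings containing exactly one '1' with windowSize < 0, A returns False (its -1 sentinel fails the status < windowSize check at the first '1' even though there is no gap at all), while B returns True, the intended value since a single 1 has no gap between ones to exceed any bound. — e.g. on judgeStr("1", -1): A returns false, B returns true
import Mathlib
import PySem

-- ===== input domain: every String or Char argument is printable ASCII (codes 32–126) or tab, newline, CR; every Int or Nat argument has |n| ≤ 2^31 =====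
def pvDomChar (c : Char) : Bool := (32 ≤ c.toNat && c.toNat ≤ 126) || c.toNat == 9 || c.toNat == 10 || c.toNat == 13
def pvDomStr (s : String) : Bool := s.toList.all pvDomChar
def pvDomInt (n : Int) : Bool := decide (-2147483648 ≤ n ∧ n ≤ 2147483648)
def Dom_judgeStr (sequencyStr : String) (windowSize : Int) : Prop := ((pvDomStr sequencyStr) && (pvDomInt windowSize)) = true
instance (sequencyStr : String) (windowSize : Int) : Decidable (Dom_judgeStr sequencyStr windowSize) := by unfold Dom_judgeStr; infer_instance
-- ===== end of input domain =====

-- B replaces A's stateful character scan (a counter with a -1 sentinel) by one split('1')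
-- and an all() over the lengths of the zero-runs strictly between consecutive ones
-- (objective: more idiomatic; same O(n) cost); return-value equivalence outside D_ below.

-- ===== PORT A =====
-- the for-loop of A with its early 'return False': state is 'status'
def judgeStrLoop (cs : List Char) (status : Int) (windowSize : Int) : Bool :=
  match cs with
  | [] => true
  | c :: rest =>
    if c = '1' then
      if status < windowSize then judgeStrLoop rest 0 windowSize
      else false
    else
      if status > -1 then judgeStrLoop rest (status + 1) windowSize
      else judgeStrLoop rest status windowSize

def judgeStr (sequencyStr : String) (windowSize : Int) : Bool :=
  judgeStrLoop sequencyStr.toList (-1) windowSize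

-- ===== PORT B =====
def judgeStr_alt (sequencyStr : String) (windowSize : Int) : Bool :=
  let parts := PySem.Chars.splitOn sequencyStr.toList ['1']   -- sequencyStr.split('1')
  -- all(len(p) < windowSize for p in parts[1:-1])
  (PySem.List.slice parts (some 1) (some (-1))).all
    (fun p => decide ((p.length : Int) < windowSize))

-- ===== PRECONDITION & SPEC =====
-- On strings with exactly one '1' and windowSize < 0, A returns False (its -1 sentinel fails
-- the 'status < windowSize' check at the first '1' even though there is no gap between ones),
-- while B returns True, the intended value: a single 1 has no gap to exceed any bound.
def D_judgeStr (sequencyStr : String) (windowSize : Int) : Prop :=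
  windowSize < 0 ∧ sequencyStr.toList.count '1' = 1
instance (sequencyStr : String) (windowSize : Int) : Decidable (D_judgeStr sequencyStr windowSize) := by unfold D_judgeStr; infer_instance

def Spec_judgeStr (sequencyStr : String) (windowSize : Int) (out : Bool) : Prop := ¬ D_judgeStr sequencyStr windowSize → out = judgeStr_alt sequencyStr windowSize
instance (sequencyStr : String) (windowSize : Int) (out : Bool) : Decidable (Spec_judgeStr sequencyStr windowSize out) := by unfold Spec_judgeStr; infer_instance

def pvDiffWitness_judgeStr : String × Int := ("1", -1)
def pvDiffWitnessOut_judgeStr : Bool × Bool := (false, true)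

-- ===== CLAIM (what is proved, stated in full; the proofs are below) =====
def Claim_unchanged_judgeStr : Prop := ∀ (sequencyStr : String) (windowSize : Int), Dom_judgeStr sequencyStr windowSize → Spec_judgeStr sequencyStr windowSize (judgeStr sequencyStr windowSize)
def Claim_changed_judgeStr : Prop := Dom_judgeStr (pvDiffWitness_judgeStr.1) (pvDiffWitness_judgeStr.2) ∧ D_judgeStr (pvDiffWitness_judgeStr.1) (pvDiffWitness_judgeStr.2) ∧ judgeStr (pvDiffWitness_judgeStr.1) (pvDiffWitness_judgeStr.2) = pvDiffWitnessOut_judgeStr.1 ∧ judgeStr_alt (pvDiffWitness_judgeStr.1) (pvDiffWitness_judgeStr.2) = pvDiffWitnessOut_judgeStr.2 ∧ pvDiffWitnessOut_judgeStr.1 ≠ pvDiffWitnessOut_judgeStr.2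
def Claim_exact_judgeStr : Prop := ∀ (sequencyStr : String) (windowSize : Int), Dom_judgeStr sequencyStr windowSize → D_judgeStr sequencyStr windowSize → judgeStr sequencyStr windowSize ≠ judgeStr_alt sequencyStr windowSize

-- ===== LEMMAS AND PROOFS =====

-- the split of a char list on '1', by structural recursion (proof-side spec of splitOn)
def parts1 : List Char → List (List Char)
  | [] => [[]]
  | c :: rest => if c = '1' then [] :: parts1 rest else (parts1 rest).modifyHead (c :: ·)

-- A's loop rephrased over the pieces of the split (proof-side only)
def altLoop : List (List Char) → Int → Int → Bool
  | [], _, _ => true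
  | [_], _, _ => true
  | p :: q :: ps, status, windowSize =>
    let s' := if status > -1 then status + (p.length : Int) else status
    if s' < windowSize then altLoop (q :: ps) 0 windowSize else false

theorem parts1_ne_nil (l : List Char) : parts1 l ≠ [] := by
  cases l with
  | nil => simp [parts1]
  | cons c rest =>
    simp only [parts1]
    split
    · simp
    · cases h : parts1 rest with
      | nil => exact absurd h (parts1_ne_nil rest)
      | cons p ps => simp [List.modifyHead]

theorem parts1_length (l : List Char) : (parts1 l).length = l.count '1' + 1 := by
  induction l with
  | nil => simp [parts1]
  | cons c rest ih =>
    by_cases hc : c = '1'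
    · subst hc; simp [parts1, ih]
    · have : ((c :: rest).count '1') = rest.count '1' := by
        simp [List.count_cons]; exact fun h => hc h
      simp only [parts1, if_neg hc, List.length_modifyHead, ih, this]

theorem modifyHead_fun_id {α : Type} (l : List α) : List.modifyHead (fun p => p) l = l := by
  cases l <;> simp

theorem go_spec : ∀ (l : List Char) (fuel : Nat), l.length ≤ fuel →
    ∀ (cur : List Char) (acc : List (List Char)),
    PySem.Chars.splitOn.go ['1'] fuel l cur acc =
      acc.reverse ++ (parts1 l).modifyHead (fun p => cur.reverse ++ p) := by
  intro l
  induction l with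
  | nil =>
    intro fuel _ cur acc
    cases fuel <;> simp [PySem.Chars.splitOn.go, parts1]
  | cons c rest ih =>
    intro fuel hf cur acc
    cases fuel with
    | zero => simp at hf
    | succ f =>
      rw [PySem.Chars.splitOn.go]
      by_cases hc : c = '1'
      · subst hc
        simp [List.isPrefixOf, ih f (by simpa using hf), parts1, modifyHead_fun_id]
      · have hb : (('1':Char) == c) = false := by
          simp; exact fun h => hc h.symm
        simp only [List.isPrefixOf, hb, Bool.false_and, if_neg Bool.false_ne_true,
          ih f (by simpa using hf) (c :: cur) acc, parts1, if_neg hc]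
        obtain ⟨p, ps, hp⟩ : ∃ p ps, parts1 rest = p :: ps := by
          cases h : parts1 rest with
          | nil => exact absurd h (parts1_ne_nil rest)
          | cons p ps => exact ⟨p, ps, rfl⟩
        simp [hp, List.modifyHead]

theorem splitOn_eq_parts1 (l : List Char) : PySem.Chars.splitOn l ['1'] = parts1 l := by
  rw [PySem.Chars.splitOn, go_spec l (l.length + 1) (by omega) [] []]
  obtain ⟨p, ps, hp⟩ : ∃ p ps, parts1 l = p :: ps := by
    cases h : parts1 l with
    | nil => exact absurd h (parts1_ne_nil l)
    | cons p ps => exact ⟨p, ps, rfl⟩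
  simp [hp, List.modifyHead]

theorem slice_one_neg_one {α : Type} (xs : List α) :
    PySem.List.slice xs (some 1) (some (-1)) = xs.tail.dropLast := by
  simp [PySem.List.slice, PySem.List.clampIdx]
  cases xs with
  | nil => simp
  | cons x rest => simp [List.dropLast_eq_take]

-- A's loop computes altLoop over the split pieces
theorem loop_eq_altLoop (cs : List Char) : ∀ (status windowSize : Int),
    judgeStrLoop cs status windowSize = altLoop (parts1 cs) status windowSize := by
  induction cs with
  | nil => intro status w; simp [judgeStrLoop, parts1, altLoop]
  | cons c rest ih =>
    intro status w
    obtain ⟨p, ps, hp⟩ : ∃ p ps, parts1 rest = p :: ps := by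
      cases h : parts1 rest with
      | nil => exact absurd h (parts1_ne_nil rest)
      | cons p ps => exact ⟨p, ps, rfl⟩
    by_cases hc : c = '1'
    · subst hc
      simp only [judgeStrLoop, parts1, ih, hp]
      by_cases hs : status < w <;> simp [altLoop, hs]
    · simp only [judgeStrLoop, parts1, if_neg hc, hp, List.modifyHead]
      by_cases hs : status > -1
      · rw [if_pos hs, ih (status + 1) w, hp]
        cases ps with
        | nil => simp [altLoop]
        | cons q qs =>
          simp only [altLoop, if_pos hs, List.length_cons]
          have h1 : status + 1 > -1 := by omega
          rw [if_pos h1]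
          have h2 : status + 1 + (p.length : Int) = status + ((p.length : Int) + 1) := by ring
          push_cast
          rw [h2]
      · rw [if_neg hs, ih status w, hp]
        cases ps with
        | nil => simp [altLoop]
        | cons q qs => simp only [altLoop, if_neg hs]

-- altLoop after the first '1': only the gaps before the last piece are checked
theorem altLoop_zero (ps : List (List Char)) (w : Int) : ps ≠ [] →
    altLoop ps 0 w = (ps.dropLast.map (fun p => (p.length : Int))).all (fun g => decide (g < w)) := by
  induction ps with
  | nil => intro h; exact absurd rfl h
  | cons q qs ih =>
    intro _
    cases qs with
    | nil => simp [altLoop]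
    | cons r rs =>
      simp only [altLoop, gt_iff_lt, show ((-1:Int) < 0) by norm_num, if_pos, zero_add]
      by_cases hq : (q.length : Int) < w
      · rw [if_pos hq, ih (by simp)]
        simp [List.dropLast, hq]
      · rw [if_neg hq]
        simp [List.dropLast, hq]

-- B unfolded over parts1: the all() over the inner pieces
theorem alt_eq (s : String) (w : Int) :
    judgeStr_alt s w = ((parts1 s.toList).tail.dropLast.map (fun p => (p.length : Int))).all
      (fun g => decide (g < w)) := by
  simp only [judgeStr_alt, splitOn_eq_parts1, slice_one_neg_one, List.all_map]
  rfl

-- ===== VERDICT (by name: the statements are the Claim_ definitions above) =====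
theorem judgeStr_spec : Claim_unchanged_judgeStr := by
  intro s w _
  unfold Spec_judgeStr
  intro hnd
  rw [judgeStr, loop_eq_altLoop, alt_eq]
  obtain ⟨p, ps, hp⟩ : ∃ p ps, parts1 s.toList = p :: ps := by
    cases h : parts1 s.toList with
    | nil => exact absurd h (parts1_ne_nil s.toList)
    | cons p ps => exact ⟨p, ps, rfl⟩
  rw [hp]
  cases ps with
  | nil => simp [altLoop]
  | cons q qs =>
    simp only [List.tail_cons, altLoop]
    have hs : ¬ ((-1:Int) > -1) := by omega
    rw [if_neg hs]
    by_cases hw : (-1:Int) < w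
    · rw [if_pos hw, altLoop_zero (q :: qs) w (by simp)]
    · -- w < 0; ¬D means qs ≠ [] (count ≠ 1)
      rw [if_neg hw]
      have hcount : s.toList.count '1' + 1 = (parts1 s.toList).length := (parts1_length s.toList).symm
      rw [hp] at hcount
      cases qs with
      | nil =>
        exfalso
        exact hnd ⟨by omega, by simp at hcount; omega⟩
      | cons r rs =>
        have hql : ¬ ((q.length : Int) < w) := by
          have : (0:Int) ≤ (q.length : Int) := by positivity
          omega
        simp [List.dropLast, hql]

theorem judgeStr_changed : Claim_changed_judgeStr := by
  unfold Claim_changed_judgeStr; decide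

theorem judgeStr_tight : Claim_exact_judgeStr := by
  intro s w _ hd
  obtain ⟨hw, hc⟩ := hd
  obtain ⟨p, q, hp⟩ : ∃ p q, parts1 s.toList = [p, q] := by
    have hlen : (parts1 s.toList).length = 2 := by rw [parts1_length, hc]
    match h : parts1 s.toList with
    | [p, q] => exact ⟨p, q, rfl⟩
    | [] | [_] | _ :: _ :: _ :: _ => rw [h] at hlen; simp at hlen
  rw [judgeStr, loop_eq_altLoop, alt_eq, hp]
  simp only [altLoop, List.tail_cons]
  have hs : ¬ ((-1:Int) > -1) := by omega
  rw [if_neg hs, if_neg (by omega : ¬ ((-1:Int) < w))]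
  simp
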